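-- pv_equiv track=rewrite | github.com/amit-223/PythonCodes | pythonProject/strings.py | xplore
-- ===== SOURCE A (Python) =====
-- def xplore(li):
--     li2 = []
--     m = 0
--     for j in li:
--         s = j[0].lower()  # take 1st char in a full string
--         li2.append(s)
--     for k in li2:  # example li2 = ['t','b','t','i','t']
--         c = li2.count(k)
--         if (c > m):
--             m = li2.count(k)
--     return m  # here m will 3 because t comes three times
-- ===== SOURCE B (Python) =====
-- def xplore(li):
--     li2 = sorted(j[0].lower() for j in li)
--     best = 0
--     run = 0
--     prev = None
--     for ch in li2:
--         run = run + 1 if prev == ch else 1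
--         if run > best:
--             best = run
--         prev = ch
--     return best
-- ===== Notes on version B (the rewrite author's own statement) =====
-- stated objective: faster
-- what changed: Replaces the quadratic repeated li2.count scan with sorting the first-character list once and a single linear pass tracking the longest run of equal characters.
import Mathlib
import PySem

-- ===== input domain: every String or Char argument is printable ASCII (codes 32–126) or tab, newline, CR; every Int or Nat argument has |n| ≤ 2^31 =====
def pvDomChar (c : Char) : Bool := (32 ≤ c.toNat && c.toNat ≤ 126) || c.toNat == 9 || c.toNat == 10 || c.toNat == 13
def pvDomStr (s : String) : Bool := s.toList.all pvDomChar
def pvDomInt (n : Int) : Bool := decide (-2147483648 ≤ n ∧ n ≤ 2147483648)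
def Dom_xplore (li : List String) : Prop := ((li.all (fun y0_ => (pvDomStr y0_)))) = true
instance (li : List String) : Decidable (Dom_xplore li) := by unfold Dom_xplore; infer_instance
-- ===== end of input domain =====

-- B sorts the lowered first characters once and scans runs: O(n log n) instead of A's repeated-count O(n^2).

-- ===== PORT A =====
-- first char of j, lowered (j[0].lower()); the .getD is unreachable under Pre_xplore (j ≠ "")
def pvFirstLower (j : String) : Char :=
  PySem.Chars.lowerChar ((PySem.List.pyGet? j.toList 0).getD ' ')

def xplore (li : List String) : Int :=
  let li2 := li.foldl (fun acc j => acc ++ [pvFirstLower j]) []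
  li2.foldl (fun m k =>
    let c : Int := (PySem.List.count li2 k : Int)
    if c > m then (PySem.List.count li2 k : Int) else m) 0

-- ===== PORT B =====
-- the single pass over the sorted list: state (best, run, prev)
def xploreScan : List Char → Int → Int → Option Char → Int
  | [], best, _, _ => best
  | ch :: t, best, run, prev =>
      let run' : Int := if prev = some ch then run + 1 else 1
      let best' : Int := if run' > best then run' else best
      xploreScan t best' run' (some ch)

def xplore_alt (li : List String) : Int :=
  let li2 := PySem.List.sorted (li.map pvFirstLower) (fun x => x) false
  xploreScan li2 0 0 none

-- ===== PRECONDITION & SPEC =====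
-- Pre_ excludes exactly the inputs containing an empty string, on which Python's j[0] raises IndexError (in A and in B alike).
def Pre_xplore (li : List String) : Prop := ∀ s ∈ li, s ≠ ""
instance (li : List String) : Decidable (Pre_xplore li) := by unfold Pre_xplore; infer_instance
def pvWitness_xplore : List String := ["Tea", "ball", "tin", "ink", "tone"]
def Spec_xplore (li : List String) (out : Int) : Prop := out = xplore_alt li
instance (li : List String) (out : Int) : Decidable (Spec_xplore li out) := by unfold Spec_xplore; infer_instance

-- ===== CLAIM =====
def Claim_equal_xplore : Prop := ∀ (li : List String), Dom_xplore li → Pre_xplore li → Spec_xplore li (xplore li)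

-- ===== LEMMAS AND PROOFS =====

-- sup b l = l.foldl max b
def pvSup (b : Int) (l : List Int) : Int := l.foldl max b

theorem pvSup_cons (b x : Int) (l : List Int) : pvSup b (x :: l) = pvSup (max b x) l := rfl

theorem pvSup_max (b v : Int) (l : List Int) : pvSup (max b v) l = max (pvSup b l) v := by
  induction l generalizing b with
  | nil => rfl
  | cons x t ih =>
      simp only [pvSup_cons]
      rw [show max (max b v) x = max (max b x) v by omega, ih]

theorem le_pvSup_base (b : Int) (l : List Int) : b ≤ pvSup b l := by
  induction l generalizing b with
  | nil => simp [pvSup]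
  | cons x t ih => simpa [pvSup_cons] using le_trans (le_max_left b x) (ih (max b x))

theorem le_pvSup_of_mem {v : Int} {l : List Int} (h : v ∈ l) (b : Int) : v ≤ pvSup b l := by
  induction l generalizing b with
  | nil => cases h
  | cons x t ih =>
      rcases List.mem_cons.mp h with rfl | h'
      · exact le_trans (le_max_right b v) (le_pvSup_base _ _)
      · exact ih h' _

-- A's second loop is a running maximum of f over the list
theorem foldl_if_max (f : Char → Int) (l : List Char) (b : Int) :
    l.foldl (fun m k => if f k > m then f k else m) b = pvSup b (l.map f) := by
  induction l generalizing b with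
  | nil => rfl
  | cons x t ih =>
      simp only [List.foldl_cons, List.map_cons, pvSup_cons]
      rw [ih, show (if f x > b then f x else b) = max b (f x) by omega]

-- B's scan over a sorted list computes the maximal multiplicity
theorem xploreScan_spec (l : List Char) (b r : Int) (p : Option Char)
    (hs : l.Pairwise (· ≤ ·)) (hp : ∀ x ∈ l, ∀ c, p = some c → c ≤ x) (hr0 : 0 ≤ r) :
    xploreScan l b r p =
      pvSup b (l.map (fun x => (l.count x : Int) + if p = some x then r else 0)) := by
  induction l generalizing b r p with
  | nil => rfl
  | cons ch t ih =>
      have hst : t.Pairwise (· ≤ ·) := (List.pairwise_cons.mp hs).2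
      have hcht : ∀ x ∈ t, ch ≤ x := (List.pairwise_cons.mp hs).1
      simp only [xploreScan]
      set r' : Int := if p = some ch then r + 1 else 1 with hr'
      rw [show (if r' > b then r' else b) = max b r' by omega]
      rw [ih _ _ _ hst (by intro x hx c hc; cases Option.some.inj hc; exact hcht x hx)
        (by rw [hr']; split <;> omega)]
      have hcnt0 : (0:Int) ≤ (t.count ch : Int) := Int.natCast_nonneg _
      have hr1 : 1 ≤ r' := by rw [hr']; split <;> omega
      -- the head's term in the target sup
      have hhead : ((ch :: t).count ch : Int) + (if p = some ch then r else 0)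
          = (t.count ch : Int) + r' := by
        by_cases hpch : p = some ch <;>
          simp [hpch, hr', List.count_cons_self] <;> omega
      -- the terms over the tail agree
      have hterm : ∀ x ∈ t,
          ((t.count x : Int) + if some ch = some x then r' else 0)
            = ((ch :: t).count x : Int) + (if p = some x then r else 0) := by
        intro x hx
        by_cases hxch : x = ch
        · subst hxch
          by_cases hpch : p = some x <;>
            simp [hpch, hr', List.count_cons_self] <;> omega
        · have hpx : ¬ p = some x := by
            intro hpx
            rcases p with _ | c
            · cases hpx
            · cases Option.some.inj hpx
              have h1 : x ≤ ch := hp ch List.mem_cons_self x rfl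
              have h2 : ch ≤ x := hcht x hx
              exact hxch (le_antisymm h1 h2)
          simp [hpx, Ne.symm hxch]
      rw [List.map_cons, pvSup_cons, hhead]
      rw [List.map_congr_left hterm]
      rw [pvSup_max, pvSup_max]
      set M := t.map (fun x => ((ch :: t).count x : Int) + if p = some x then r else 0) with hM
      by_cases hch : ch ∈ t
      · have hmem : ((ch :: t).count ch : Int) + (if p = some ch then r else 0) ∈ M := by
          rw [hM]; exact List.mem_map_of_mem hch
        have h1 : (t.count ch : Int) + r' ≤ pvSup b M := by
          have := le_pvSup_of_mem hmem b; rwa [hhead] at this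
        have h2 : r' ≤ pvSup b M := le_trans (by omega) h1
        rw [max_eq_left h2, max_eq_left h1]
      · have : (t.count ch : Int) = 0 := by
          simp [List.count_eq_zero_of_not_mem hch]
        rw [this, zero_add]
-- the two loops over permuted lists have equal maxima
theorem pvSup_perm (b : Int) {l₁ l₂ : List Int} (h : l₁.Perm l₂) : pvSup b l₁ = pvSup b l₂ :=
  h.foldl_eq b

theorem xplore_eq_alt (li : List String) : xplore li = xplore_alt li := by
  unfold xplore xplore_alt
  simp only [PySem.List.foldl_append_singleton_eq_map, List.nil_append]
  set l2 := li.map pvFirstLower with hl2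
  set s := PySem.List.sorted l2 (fun x => x) false with hs
  have hperm : s.Perm l2 := PySem.List.sorted_perm l2 (fun x => x) false
  have hpair : s.Pairwise (· ≤ ·) := by
    simpa using PySem.List.sorted_pairwise (xs := l2) (key := fun x => x)
  rw [foldl_if_max (fun k => (PySem.List.count l2 k : Int)) l2 0]
  rw [xploreScan_spec s 0 0 none hpair (by intro x hx c hc; cases hc) le_rfl]
  simp only [PySem.List.count]
  have hcnt : ∀ x, (s.count x : Int) = (l2.count x : Int) := by
    intro x; exact_mod_cast hperm.count_eq x
  calc pvSup 0 (l2.map fun k => (l2.count k : Int))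
      = pvSup 0 (s.map fun k => (l2.count k : Int)) :=
        (pvSup_perm 0 (hperm.map _)).symm
    _ = pvSup 0 (s.map fun x => (s.count x : Int) + if (none : Option Char) = some x then 0 else 0) := by
        apply congrArg; apply List.map_congr_left; intro x hx; simp [hcnt x]
    _ = _ := rfl

-- ===== VERDICT =====
theorem xplore_spec : Claim_equal_xplore := by
  intro li _ _
  unfold Spec_xplore
  exact xplore_eq_alt li
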